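-- pv_equiv track=rewrite | github.com/vrajeshsh/gfg-practice | Remainder with 7 - GFG/remainder-with-7.py | remainderWith7
-- ===== SOURCE A (Python) =====
-- def remainderWith7(num):
--     #Code here
--     series = [1, 3, 2, -1, -3, -2];
--
-- # Index of next element
-- # in series
--     series_index = 0;
--
--     # Initialize result
--     result = 0;
--
--     # Traverse num from end
--     for i in range((len(num) - 1), -1, -1):
--
--         # Find current digit of num
--         digit = ord(num[i]) - 48;
--
--         # Add next term to result
--         result += digit * series[series_index];
--
--         # Move to next term in series
--         series_index = (series_index + 1) % 6;
--
--         # Make sure that result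
--         # never goes beyond 7.
--         result %= 7;
--
--     # Make sure that remainder
--     # is positive
--
--     if (result < 0):
--         result = (result + 7) % 7;
--     return result;
-- ===== SOURCE B (Python) =====
-- def remainderWith7(num):
--     result = 0
--     for c in num:
--         result = (result * 10 + (ord(c) - 48)) % 7
--     return result
-- ===== Notes on version B (the rewrite author's own statement) =====
-- stated objective: simpler
-- what changed: Replaces the precomputed 6-term power-of-10 residue table and cycling index over a back-to-front indexed scan with a plain front-to-back Horner pass keeping only a running remainder.
import Mathlib
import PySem

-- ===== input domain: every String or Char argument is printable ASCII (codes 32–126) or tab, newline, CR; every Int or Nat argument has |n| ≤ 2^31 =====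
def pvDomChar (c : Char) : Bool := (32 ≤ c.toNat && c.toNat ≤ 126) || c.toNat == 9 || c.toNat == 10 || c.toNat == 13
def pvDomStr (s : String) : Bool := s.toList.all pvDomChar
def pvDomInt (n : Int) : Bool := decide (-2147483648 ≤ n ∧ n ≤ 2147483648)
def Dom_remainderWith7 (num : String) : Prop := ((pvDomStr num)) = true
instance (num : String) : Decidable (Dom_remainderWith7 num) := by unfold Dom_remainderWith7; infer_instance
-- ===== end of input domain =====

-- B replaces A's 6-term residue table and cycling index over a back-to-front scan
-- with a plain front-to-back Horner pass keeping only the running remainder (objective: simpler).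

-- ===== PORT A =====
def seriesA : List Int := [1, 3, 2, -1, -3, -2]

-- one iteration of A's loop body: state = (series_index, result)
def stepA (st : Int × Int) (c : Char) : Int × Int :=
  let digit : Int := (c.toNat : Int) - 48
  let result := st.2 + digit * ((PySem.List.pyGet? seriesA st.1).getD 0)
  (PySem.Int.mod (st.1 + 1) 6, PySem.Int.mod result 7)

def remainderWith7 (num : String) : Int :=
  -- 'for i in range(len(num)-1, -1, -1): … num[i] …' visits the characters in reverse
  let result := (num.toList.reverse.foldl stepA (0, 0)).2
  if result < 0 then PySem.Int.mod (result + 7) 7 else result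

-- ===== PORT B =====
def stepB (r : Int) (c : Char) : Int :=
  PySem.Int.mod (r * 10 + ((c.toNat : Int) - 48)) 7

def remainderWith7_alt (num : String) : Int :=
  num.toList.foldl stepB 0

-- ===== PRECONDITION & SPEC =====
def Spec_remainderWith7 (num : String) (out : Int) : Prop := out = remainderWith7_alt num
instance (num : String) (out : Int) : Decidable (Spec_remainderWith7 num out) := by unfold Spec_remainderWith7; infer_instance

-- ===== CLAIM (what is proved, stated in full; the proofs are below) =====
def Claim_equal_remainderWith7 : Prop := ∀ (num : String), Dom_remainderWith7 num → Spec_remainderWith7 num (remainderWith7 num)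

-- ===== LEMMAS AND PROOFS =====

-- the "digit" value both programs use, as an element of ZMod 7
def dZ (c : Char) : ZMod 7 := (((c.toNat : Int) - 48 : Int) : ZMod 7)

-- reversed-order base-3 value (3 ≡ 10 [ZMod 7]): V (c :: l) weights c with 3^0
def V : List Char → ZMod 7
  | [] => 0
  | c :: l => dZ c + 3 * V l

theorem intCast_emod7 (a : Int) : (((a % 7 : Int)) : ZMod 7) = (a : ZMod 7) := by
  have h : (7 : ZMod 7) = 0 := by decide
  rw [Int.emod_def]
  push_cast
  rw [h]
  ring

theorem series_cast (k : Int) (h0 : 0 ≤ k) (h6 : k < 6) :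
    (((PySem.List.pyGet? seriesA k).getD 0 : Int) : ZMod 7) = 3 ^ k.toNat := by
  interval_cases k <;> decide

theorem pow_next (k : Int) (h0 : 0 ≤ k) (h6 : k < 6) :
    (3 : ZMod 7) ^ (((k + 1) % 6).toNat) = 3 ^ (k.toNat + 1) := by
  interval_cases k <;> decide

theorem V_append (l : List Char) (c : Char) :
    V (l ++ [c]) = V l + 3 ^ l.length * dZ c := by
  induction l with
  | nil => simp [V]
  | cons a l ih => simp [V, ih, pow_succ]; ring

-- A's loop: invariant in ZMod 7, plus range of the result component
theorem foldA_cast (l : List Char) : ∀ (k r : Int), 0 ≤ k → k < 6 →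
    ((l.foldl stepA (k, r)).2 : ZMod 7) = (r : ZMod 7) + 3 ^ k.toNat * V l := by
  induction l with
  | nil => intro k r _ _; simp [V]
  | cons c l ih =>
    intro k r hk0 hk6
    have h6 : (0 : Int) < 6 := by norm_num
    have h7 : (0 : Int) < 7 := by norm_num
    simp only [List.foldl_cons, stepA, PySem.Int.mod_eq_emod_of_pos h6,
      PySem.Int.mod_eq_emod_of_pos h7]
    rw [ih _ _ (Int.emod_nonneg _ (by norm_num)) (Int.emod_lt_of_pos _ h6)]
    rw [intCast_emod7, pow_next k hk0 hk6]
    push_cast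
    rw [series_cast k hk0 hk6]
    simp only [V]
    unfold dZ
    push_cast
    ring

theorem foldA_range (l : List Char) : ∀ (k r : Int), 0 ≤ r → r < 7 →
    0 ≤ (l.foldl stepA (k, r)).2 ∧ (l.foldl stepA (k, r)).2 < 7 := by
  induction l with
  | nil => intro k r h0 h7; exact ⟨h0, h7⟩
  | cons c l ih =>
    intro k r _ _
    have h7 : (0 : Int) < 7 := by norm_num
    simp only [List.foldl_cons, stepA, PySem.Int.mod_eq_emod_of_pos h7]
    exact ih _ _ (Int.emod_nonneg _ (by norm_num)) (Int.emod_lt_of_pos _ h7)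

-- B's loop: invariant in ZMod 7, plus range
theorem foldB_cast (l : List Char) : ∀ (r : Int),
    ((l.foldl stepB r : Int) : ZMod 7) = 3 ^ l.length * (r : ZMod 7) + V l.reverse := by
  induction l with
  | nil => intro r; simp [V]
  | cons c l ih =>
    intro r
    have h7 : (0 : Int) < 7 := by norm_num
    simp only [List.foldl_cons, stepB, PySem.Int.mod_eq_emod_of_pos h7]
    rw [ih, intCast_emod7, List.reverse_cons, V_append]
    have h10 : (10 : ZMod 7) = 3 := by decide
    push_cast
    rw [h10]
    simp only [List.length_reverse, List.length_cons]
    unfold dZ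
    push_cast
    rw [pow_succ]
    ring

theorem foldB_range (l : List Char) : ∀ (r : Int), 0 ≤ r → r < 7 →
    0 ≤ l.foldl stepB r ∧ l.foldl stepB r < 7 := by
  induction l with
  | nil => intro r h0 h7; exact ⟨h0, h7⟩
  | cons c l ih =>
    intro r _ _
    have h7 : (0 : Int) < 7 := by norm_num
    simp only [List.foldl_cons, stepB, PySem.Int.mod_eq_emod_of_pos h7]
    exact ih _ (Int.emod_nonneg _ (by norm_num)) (Int.emod_lt_of_pos _ h7)

theorem eq_of_cast_eq (a b : Int) (ha0 : 0 ≤ a) (ha7 : a < 7) (hb0 : 0 ≤ b) (hb7 : b < 7)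
    (h : (a : ZMod 7) = (b : ZMod 7)) : a = b := by
  rw [ZMod.intCast_eq_intCast_iff'] at h
  simp only [Nat.cast_ofNat] at h
  rwa [Int.emod_eq_of_lt ha0 ha7, Int.emod_eq_of_lt hb0 hb7] at h

-- ===== VERDICT (by name: the statement is the Claim_ definition above) =====
theorem remainderWith7_spec : Claim_equal_remainderWith7 := by
  intro num _
  unfold Spec_remainderWith7 remainderWith7 remainderWith7_alt
  set l := num.toList with hl
  obtain ⟨hA0, hA7⟩ := foldA_range l.reverse 0 0 (le_refl 0) (by norm_num)
  obtain ⟨hB0, hB7⟩ := foldB_range l 0 (le_refl 0) (by norm_num)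
  have hcast : (((l.reverse.foldl stepA (0, 0)).2 : Int) : ZMod 7)
      = ((l.foldl stepB 0 : Int) : ZMod 7) := by
    rw [foldA_cast l.reverse 0 0 (le_refl 0) (by norm_num), foldB_cast l 0]
    simp
  have heq := eq_of_cast_eq _ _ hA0 hA7 hB0 hB7 hcast
  simp only []
  rw [if_neg (by omega)]
  exact heq
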